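-- pv_equiv track=rewrite | github.com/KoenLam/AoC2020 | 18/day18.py | plus_add_parenthesis
-- ===== SOURCE A (Python) =====
-- def find_after_plus(eq):
--     match = ""
--     num_parent = 0
--     for l in eq:
--         if l == "(":
--             num_parent += 1
--         elif l == ")":
--             num_parent -= 1
--             if num_parent == 0:
--                 match += l
--                 break
--             elif num_parent < 0:
--                 break
--         elif (l == "+" or l == "*") and num_parent == 0:
--             break
--         match += l
--     return match
--
-- def find_before_plus(eq):
--     match = ""
--     match = ""
--     num_parent = 0
--     for l in eq[::-1]:
--         if l == ")":
--             num_parent += 1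
--         elif l == "(":
--             num_parent -= 1
--             if num_parent == 0:
--                 match += l
--                 break
--             elif num_parent < 0:
--                 break
--         elif (l == "+" or l == "*") and num_parent == 0:
--             break
--         match += l
--     return match[::-1]
--
-- def plus_add_parenthesis(eq):
--     i = 0
--     while i < len(eq):
--         l = eq[i]
--
--         if l == "+":
--             after = find_after_plus(eq[i+1:])
--             before = find_before_plus(eq[:i])
--             eq = eq[:i-len(before)] \
--                 + f"({before}+{after})" \
--                 + eq[i+len(after)+1:]
--             i +=  1 # To compensate for the extra parenthesis
--
--         i += 1
--     return eq
-- ===== SOURCE B (Python) =====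
-- def plus_add_parenthesis(eq):
--     # One left-to-right pass with a stack of enclosing contexts.
--     # Per level: out = text already flushed (ends after a '*'),
--     #            oper = the operand currently being built,
--     #            p = 1 while the right operand of an inserted '(' is still open.
--     stack = []
--     out = ""
--     oper = ""
--     p = 0
--     for ch in eq:
--         if ch == '+':
--             oper = '(' + oper + ')' * p + '+'
--             p = 1
--         elif ch == '*':
--             out += oper + ')' * p + '*'
--             oper = ""
--             p = 0
--         elif ch == '(':
--             stack.append((out, oper, p))
--             out = ""
--             oper = ""
--             p = 0
--         elif ch == ')':
--             group = '(' + out + oper + ')' * p + ')'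
--             out, oper, p = stack.pop()
--             if p:
--                 oper += group + ')'
--                 p = 0
--             else:
--                 out += oper
--                 oper = group
--         else:
--             oper += ch
--     return out + oper + ')' * p
-- ===== Notes on version B (the rewrite author's own statement) =====
-- stated objective: faster
-- what changed: A repeatedly rescans and rewrites the string in place (for every '+' it scans backward and forward for the two operands and rebuilds the whole string); B is a single left-to-right pass with a stack of enclosing contexts that builds the parenthesized output incrementally; Pre_ excludes strings with unbalanced parentheses, on which A's operand scans cut off at accidental points and B's stack pass raises (extra ')') or drops the unclosed context (extra '(').
-- outside the precondition, e.g. on plus_add_parenthesis('('): A returns '(', B returns ''; on plus_add_parenthesis(')'): A returns ')', B raises IndexError; on plus_add_parenthesis('(1+2'): A returns '((1+2)', B returns '(1+2)'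
import Mathlib
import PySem

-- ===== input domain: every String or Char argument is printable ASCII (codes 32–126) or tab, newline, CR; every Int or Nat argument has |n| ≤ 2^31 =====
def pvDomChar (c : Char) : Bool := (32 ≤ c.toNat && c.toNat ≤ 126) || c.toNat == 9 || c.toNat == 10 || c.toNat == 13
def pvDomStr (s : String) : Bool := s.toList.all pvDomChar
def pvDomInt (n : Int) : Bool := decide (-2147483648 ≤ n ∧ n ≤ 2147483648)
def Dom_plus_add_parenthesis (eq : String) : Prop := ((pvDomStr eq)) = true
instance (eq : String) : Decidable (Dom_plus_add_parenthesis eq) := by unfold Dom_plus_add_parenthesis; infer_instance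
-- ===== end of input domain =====

-- B replaces A's repeated rescan-and-rewrite of the string (one backward and one forward
-- scan plus a full rebuild per '+') with a single left-to-right pass over the input using a
-- stack of enclosing contexts (objective: faster; equivalence proved on balanced inputs).


-- ===== PORT A =====

-- find_after_plus: forward scan; stops at a top-level '+'/'*', at an unmatched ')',
-- or just after the first balanced '(…)' group.
def faGo : List Char → Int → List Char
  | [], _ => []
  | l :: rest, np =>
    if l = '(' then l :: faGo rest (np + 1)
    else if l = ')' then
      if np - 1 = 0 then [l]
      else if np - 1 < 0 then []
      else l :: faGo rest (np - 1)
    else if (l = '+' ∨ l = '*') ∧ np = 0 then []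
    else l :: faGo rest np

def find_after_plus (cs : List Char) : List Char := faGo cs 0

-- find_before_plus: the same scan over eq[::-1] with '(' and ')' swapped, result reversed.
def fbGo : List Char → Int → List Char
  | [], _ => []
  | l :: rest, np =>
    if l = ')' then l :: fbGo rest (np + 1)
    else if l = '(' then
      if np - 1 = 0 then [l]
      else if np - 1 < 0 then []
      else l :: fbGo rest (np - 1)
    else if (l = '+' ∨ l = '*') ∧ np = 0 then []
    else l :: fbGo rest np

def find_before_plus (cs : List Char) : List Char := (fbGo cs.reverse 0).reverse

-- the scans return a prefix of their input (cited by aloop's termination proof)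
theorem faGo_prefix : ∀ (cs : List Char) (np : Int), (faGo cs np).IsPrefix cs := by
  intro cs
  induction cs with
  | nil => intro np; simp [faGo]
  | cons l rest ih =>
    intro np
    simp only [faGo]
    split_ifs <;>
      first
        | exact List.nil_prefix
        | exact ⟨rest, rfl⟩
        | exact (List.cons_prefix_cons).2 ⟨rfl, ih _⟩

theorem fbGo_prefix : ∀ (cs : List Char) (np : Int), (fbGo cs np).IsPrefix cs := by
  intro cs
  induction cs with
  | nil => intro np; simp [fbGo]
  | cons l rest ih =>
    intro np
    simp only [fbGo]
    split_ifs <;>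
      first
        | exact List.nil_prefix
        | exact ⟨rest, rfl⟩
        | exact (List.cons_prefix_cons).2 ⟨rfl, ih _⟩

theorem find_before_len (cs : List Char) : (find_before_plus cs).length ≤ cs.length := by
  have h := (fbGo_prefix cs.reverse 0).length_le
  simpa [find_before_plus] using h

-- measure fact for the '+' rewrite step (cited by aloop's decreasing_by)
theorem aloop_measure (eq : List Char) (i : Nat) (h : i < eq.length) (hp : eq[i] = '+')
    (eq' : List Char)
    (heq' : eq' = eq.take (i - (find_before_plus (eq.take i)).length) ++
      '(' :: (find_before_plus (eq.take i) ++ '+' ::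
        (find_after_plus (eq.drop (i + 1)) ++ ')' ::
          eq.drop (i + (find_after_plus (eq.drop (i + 1))).length + 1)))) :
    2 * ((eq'.drop (i + 2)).countP (· = '+')) + (eq'.length - (i + 2))
      < 2 * ((eq.drop i).countP (· = '+')) + (eq.length - i) := by
  set B := find_before_plus (eq.take i) with hBdef
  set A := find_after_plus (eq.drop (i + 1)) with hAdef
  have hlb : B.length ≤ i := by
    have h1 := find_before_len (eq.take i)
    rw [← hBdef] at h1
    have h2 : (eq.take i).length = min i eq.length := List.length_take ..
    omega
  obtain ⟨t, ht⟩ := faGo_prefix (eq.drop (i + 1)) 0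
  have hAt : A ++ t = eq.drop (i + 1) := ht
  have htR : eq.drop (i + A.length + 1) = t := by
    have h3 : eq.drop (i + A.length + 1) = (eq.drop (i + 1)).drop A.length := by
      rw [List.drop_drop]; congr 1; omega
    rw [h3, ← hAt]; simp
  have hla : A.length + t.length = eq.length - (i + 1) := by
    have h4 := congrArg List.length hAt
    simp at h4
    omega
  have hsplit : eq' = (eq.take (i - B.length) ++ '(' :: B ++ ['+']) ++
      (A ++ ')' :: eq.drop (i + A.length + 1)) := by
    rw [heq']; simp
  have hPlen : (eq.take (i - B.length) ++ '(' :: B ++ ['+']).length = i + 2 := by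
    simp [List.length_take]
    omega
  have hdrop2 : eq'.drop (i + 2) = A ++ ')' :: eq.drop (i + A.length + 1) := by
    rw [hsplit, ← hPlen, List.drop_left]
  have hold : eq.drop i = '+' :: (A ++ t) := by
    rw [List.drop_eq_getElem_cons h, hp, hAt]
  have hlen : eq'.length = eq.length + 2 := by
    rw [hsplit]
    simp [List.length_take, htR]
    omega
  rw [hdrop2, htR, hold, hlen]
  simp [List.countP_append, List.countP_cons]

def aloop (eq : List Char) (i : Nat) : List Char :=
  if h : i < eq.length then
    if eq[i] = '+' then
      aloop (eq.take (i - (find_before_plus (eq.take i)).length) ++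
             '(' :: (find_before_plus (eq.take i) ++ '+' ::
               (find_after_plus (eq.drop (i + 1)) ++ ')' ::
                 eq.drop (i + (find_after_plus (eq.drop (i + 1))).length + 1)))) (i + 2)
    else aloop eq (i + 1)
  else eq
termination_by 2 * ((eq.drop i).countP (· = '+')) + (eq.length - i)
decreasing_by
  · exact aloop_measure eq i h (by assumption) _ rfl
  · have hd : eq.drop i = eq[i] :: eq.drop (i + 1) := List.drop_eq_getElem_cons h
    rw [hd, List.countP_cons]
    simp only [decide_eq_true_eq]
    have : ¬ (eq[i] = '+') := by assumption
    rw [if_neg this]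
    omega

def plus_add_parenthesis (eq : String) : String := String.ofList (aloop eq.toList 0)

-- ===== PORT B =====

-- ')' * n
def rep (n : Nat) : List Char := List.replicate n ')'

-- state of Source B's pass: the stack of enclosing contexts plus (out, oper, p) of the current one
structure BSt where
  stack : List (List Char × List Char × Nat)
  out : List Char
  oper : List Char
  p : Nat
deriving DecidableEq, Repr

def bstep (s : BSt) (ch : Char) : BSt :=
  if ch = '+' then { s with oper := '(' :: s.oper ++ rep s.p ++ ['+'], p := 1 }
  else if ch = '*' then
    { s with out := s.out ++ s.oper ++ rep s.p ++ ['*'], oper := [], p := 0 }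
  else if ch = '(' then
    { stack := (s.out, s.oper, s.p) :: s.stack, out := [], oper := [], p := 0 }
  else if ch = ')' then
    match s.stack with
    | (o, c, q) :: st =>
      let g := '(' :: (s.out ++ s.oper ++ rep s.p) ++ [')']
      if q ≠ 0 then { stack := st, out := o, oper := c ++ g ++ [')'], p := 0 }
      else { stack := st, out := o ++ c, oper := g, p := 0 }
    | [] => s   -- Python raises IndexError here; unreachable under Pre_ (balanced parentheses)
  else { s with oper := s.oper ++ [ch] }

def plus_add_parenthesis_alt (eq : String) : String :=
  let s := eq.toList.foldl bstep { stack := [], out := [], oper := [], p := 0 }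
  String.ofList (s.out ++ s.oper ++ rep s.p)

-- ===== PRECONDITION & SPEC =====

-- Pre_ excludes strings with unbalanced parentheses: A still returns there, but its operand
-- scans cut off at accidental points, while B's natural stack pass raises on an extra ')'
-- and drops the unclosed context on an extra '('.
def balChk : List Char → Nat → Bool
  | [], d => d == 0
  | c :: w, d =>
    if c = '(' then balChk w (d + 1)
    else if c = ')' then decide (0 < d) && balChk w (d - 1)
    else balChk w d

def Pre_plus_add_parenthesis (eq : String) : Prop := balChk eq.toList 0 = true
instance (eq : String) : Decidable (Pre_plus_add_parenthesis eq) := by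
  unfold Pre_plus_add_parenthesis; infer_instance

def pvWitness_plus_add_parenthesis : String := "1+2*3"

def Spec_plus_add_parenthesis (eq : String) (out : String) : Prop := out = plus_add_parenthesis_alt eq
instance (eq : String) (out : String) : Decidable (Spec_plus_add_parenthesis eq out) := by unfold Spec_plus_add_parenthesis; infer_instance

-- ===== CLAIM (what is proved, stated in full; the proofs are below) =====
def Claim_equal_plus_add_parenthesis : Prop := ∀ (eq : String), Dom_plus_add_parenthesis eq → Pre_plus_add_parenthesis eq → Spec_plus_add_parenthesis eq (plus_add_parenthesis eq)

-- ===== LEMMAS AND PROOFS =====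

-- paren counts and shape predicates
def cntO (u : List Char) : Nat := u.countP (· = '(')
def cntC (u : List Char) : Nat := u.countP (· = ')')
def plain (u : List Char) : Prop := ∀ ch ∈ u, ch ≠ '(' ∧ ch ≠ ')' ∧ ch ≠ '+' ∧ ch ≠ '*'
def pfx (u : List Char) : Prop := ∀ v, v <+: u → cntC v ≤ cntO v
def dyck (u : List Char) : Prop := pfx u ∧ cntO u = cntC u
def grp (g : List Char) : Prop := ∃ M, dyck M ∧ g = '(' :: M ++ [')']

-- invariant of one level of B's state
def levOK (out oper : List Char) (p : Nat) : Prop :=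
  p ≤ 1 ∧ dyck out ∧
  ∃ G t, oper ++ rep p = G ++ t ∧ plain t ∧
    ((G = [] ∧ (out = [] ∨ ∃ o', out = o' ++ ['*'])) ∨ (grp G ∧ (p = 1 → t = [])))

def WFst : List (List Char × List Char × Nat) → Prop
  | [] => True
  | (o, c, q) :: st => levOK o c q ∧ WFst st

def WF (s : BSt) : Prop := levOK s.out s.oper s.p ∧ WFst s.stack

-- the text B has flushed for the enclosing contexts
def flat : List (List Char × List Char × Nat) → List Char
  | [] => []
  | (o, c, _) :: st => flat st ++ o ++ c ++ ['(']

def pend (s : BSt) : List Nat := s.p :: s.stack.map (fun f => f.2.2)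

-- A's current string beyond the cursor: the remaining input decorated with the
-- pending inserted ')' of each open level
def dec : List Nat → List Char → List Char
  | [], w => w
  | p :: ps, [] => rep (p + ps.sum)
  | p :: ps, c :: w =>
    if c = '+' then rep p ++ '+' :: dec (0 :: ps) w
    else if c = '*' then rep p ++ '*' :: dec (0 :: ps) w
    else if c = '(' then '(' :: dec (0 :: p :: ps) w
    else if c = ')' then
      match ps with
      | q :: ps' => rep p ++ ')' :: (rep q ++ dec (0 :: ps') w)
      | [] => rep p ++ ')' :: dec [] w
    else c :: dec (p :: ps) w

theorem cntO_cons (c : Char) (u : List Char) :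
    cntO (c :: u) = cntO u + (if c = '(' then 1 else 0) := by
  simp [cntO, List.countP_cons]

theorem cntC_cons (c : Char) (u : List Char) :
    cntC (c :: u) = cntC u + (if c = ')' then 1 else 0) := by
  simp [cntC, List.countP_cons]

theorem cntO_append (u v : List Char) : cntO (u ++ v) = cntO u + cntO v := by
  simp [cntO, List.countP_append]

theorem cntC_append (u v : List Char) : cntC (u ++ v) = cntC u + cntC v := by
  simp [cntC, List.countP_append]

theorem dec_zeros : ∀ (w : List Char) (ps : List Nat), (∀ q ∈ ps, q = 0) →
    dec (0 :: ps) w = w := by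
  intro w
  induction w with
  | nil =>
    intro ps hz
    have : ps.sum = 0 := List.sum_eq_zero hz
    simp [dec, this, rep]
  | cons c w ih =>
    intro ps hz
    by_cases h1 : c = '+'
    · simp [dec, h1, rep, ih ps hz]
    · by_cases h2 : c = '*'
      · simp [dec, h1, h2, rep, ih ps hz]
      · by_cases h3 : c = '('
        · have : dec (0 :: 0 :: ps) w = w := by
            refine ih (0 :: ps) ?_
            intro x hx
            rcases List.mem_cons.1 hx with hx | hx
            · exact hx
            · exact hz x hx
          simp [dec, h1, h2, h3, this]
        · by_cases h4 : c = ')'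
          · cases ps with
            | nil => simp [dec, h1, h2, h3, h4, rep]
            | cons q ps' =>
              have hq0 : q = 0 := hz q (by simp)
              have : dec (0 :: ps') w = w := by
                refine ih ps' ?_
                intro x hx
                exact hz x (by simp [hx])
              simp [dec, h1, h2, h3, h4, hq0, rep, this]
          · simp [dec, h1, h2, h3, h4, ih ps hz]

-- generic helpers --------------------------------------------------------

theorem prefix_append_cases {α : Type} {v x y : List α} (h : v <+: x ++ y) :
    v <+: x ∨ ∃ v', v = x ++ v' ∧ v' <+: y := by
  by_cases hle : v.length ≤ x.length
  · left
    exact List.prefix_of_prefix_length_le h (List.prefix_append x y) hle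
  · right
    have hxv : x <+: v := List.prefix_of_prefix_length_le (List.prefix_append x y) h (by omega)
    obtain ⟨v', rfl⟩ := hxv
    refine ⟨v', rfl, ?_⟩
    obtain ⟨t, ht⟩ := h
    refine ⟨t, ?_⟩
    have h2 : x ++ (v' ++ t) = x ++ y := by simpa [List.append_assoc] using ht
    exact List.append_cancel_left h2

theorem cntO_nil : cntO [] = 0 := rfl
theorem cntC_nil : cntC [] = 0 := rfl

theorem cntO_singleton (c : Char) : cntO [c] = if c = '(' then 1 else 0 := by
  simp [cntO, List.countP_cons]

theorem cntC_singleton (c : Char) : cntC [c] = if c = ')' then 1 else 0 := by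
  simp [cntC, List.countP_cons]

theorem cntO_reverse (u : List Char) : cntO u.reverse = cntO u := by
  induction u with
  | nil => rfl
  | cons c u ih =>
    rw [List.reverse_cons, cntO_append, ih, cntO_cons c u, cntO_cons c [], cntO_nil]
    omega

theorem cntC_reverse (u : List Char) : cntC u.reverse = cntC u := by
  induction u with
  | nil => rfl
  | cons c u ih =>
    rw [List.reverse_cons, cntC_append, ih, cntC_cons c u, cntC_cons c [], cntC_nil]
    omega

theorem plain_reverse (u : List Char) (h : plain u) : plain u.reverse :=
  fun c hc => h c (List.mem_reverse.1 hc)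

theorem plain_cntO (u : List Char) (h : plain u) : cntO u = 0 := by
  rw [cntO, List.countP_eq_zero]
  intro a ha
  simp [(h a ha).1]

theorem plain_cntC (u : List Char) (h : plain u) : cntC u = 0 := by
  rw [cntC, List.countP_eq_zero]
  intro a ha
  simp [(h a ha).2.1]

theorem dyck_nil : dyck [] := by
  refine ⟨?_, rfl⟩
  intro v hv
  rw [List.prefix_nil.1 hv]
  exact Nat.le_refl _

theorem plain_dyck (u : List Char) (h : plain u) : dyck u := by
  refine ⟨?_, by rw [plain_cntO u h, plain_cntC u h]⟩
  intro v hv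
  have hpv : plain v := fun c hc => h c (hv.subset hc)
  rw [plain_cntO v hpv, plain_cntC v hpv]

theorem dyck_append (a b : List Char) (ha : dyck a) (hb : dyck b) : dyck (a ++ b) := by
  obtain ⟨hpa, hca⟩ := ha
  obtain ⟨hpb, hcb⟩ := hb
  refine ⟨?_, by rw [cntO_append, cntC_append]; omega⟩
  intro v hv
  rcases prefix_append_cases hv with h | ⟨v', rfl, hv'⟩
  · exact hpa v h
  · have := hpb v' hv'
    rw [cntO_append, cntC_append]
    omega

theorem grp_dyck (g : List Char) (h : grp g) : dyck g := by
  obtain ⟨M, hM, rfl⟩ := h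
  constructor
  · intro v hv
    cases v with
    | nil => simp [cntO, cntC]
    | cons c v2 =>
      have hv' : c :: v2 <+: '(' :: (M ++ [')']) := by simpa using hv
      obtain ⟨hc, hv2⟩ := (List.cons_prefix_cons).1 hv'
      subst hc
      rcases prefix_append_cases hv2 with h2 | ⟨v3, rfl, hv3⟩
      · have := hM.1 v2 h2
        rw [cntO_cons, cntC_cons]
        simp
        omega
      · have hv3' : v3 = [] ∨ v3 = [')'] := by
          cases v3 with
          | nil => exact Or.inl rfl
          | cons c4 v4 =>
            obtain ⟨hc4, hv4⟩ := (List.cons_prefix_cons).1 hv3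
            subst hc4
            rw [List.prefix_nil.1 hv4]
            exact Or.inr rfl
        have hMc := hM.2
        rcases hv3' with rfl | rfl <;>
          · rw [cntO_cons, cntC_cons, cntO_append, cntC_append]
            simp [cntO_nil, cntC_nil, cntO_singleton, cntC_singleton]
            omega
  · have hMc := hM.2
    rw [show ('(' :: M ++ [')'] : List Char) = '(' :: (M ++ [')']) from by simp,
        cntO_cons, cntC_cons, cntO_append, cntC_append, cntO_singleton, cntC_singleton]
    simp
    omega

theorem dyck_suffix (M : List Char) (hM : dyck M) (s : List Char) (hs : s <:+ M) :
    cntO s ≤ cntC s := by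
  obtain ⟨pre, rfl⟩ := hs
  have h1 := hM.1 pre (List.prefix_append _ _)
  have h2 := hM.2
  rw [cntO_append, cntC_append] at h2
  omega

theorem drop_cons_head (eq : List Char) (i : Nat) (c : Char) (t : List Char)
    (hd : eq.drop i = c :: t) : i < eq.length ∧ eq.drop (i + 1) = t := by
  have hlen := congrArg List.length hd
  simp [List.length_drop] at hlen
  constructor
  · omega
  · have h2 : eq.drop (i + 1) = (eq.drop i).drop 1 := by
      rw [List.drop_drop, Nat.add_comm]
    rw [h2, hd]
    simp

theorem drop_cons_getElem (eq : List Char) (i : Nat) (c : Char) (t : List Char)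
    (hd : eq.drop i = c :: t) (h : i < eq.length) : eq[i] = c := by
  have h0 : eq.drop i = eq[i] :: eq.drop (i + 1) := List.drop_eq_getElem_cons h
  rw [hd] at h0
  exact ((List.cons_eq_cons).1 h0).1.symm

theorem aloop_skip (eq : List Char) (i : Nat) (c : Char) (t : List Char)
    (hd : eq.drop i = c :: t) (hc : c ≠ '+') : aloop eq i = aloop eq (i + 1) := by
  obtain ⟨hi, -⟩ := drop_cons_head eq i c t hd
  have hg : eq[i] = c := drop_cons_getElem eq i c t hd hi
  rw [aloop]
  rw [dif_pos hi, if_neg (by rw [hg]; exact hc)]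

theorem aloop_skip_many : ∀ (u : List Char) (eq : List Char) (i : Nat) (t : List Char),
    eq.drop i = u ++ t → (∀ x ∈ u, x ≠ '+') → aloop eq i = aloop eq (i + u.length) := by
  intro u
  induction u with
  | nil => intro eq i t hd _; simp
  | cons c u ih =>
    intro eq i t hd hne
    have hd' : eq.drop i = c :: (u ++ t) := by simpa using hd
    have h1 := aloop_skip eq i c (u ++ t) hd' (hne c (by simp))
    have h2 := (drop_cons_head eq i c (u ++ t) hd').2
    rw [h1, ih eq (i + 1) t h2 (fun x hx => hne x (by simp [hx]))]
    congr 1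
    simp
    omega

theorem aloop_plus (eq : List Char) (i : Nat) (h : i < eq.length) (hp : eq[i] = '+') :
    aloop eq i = aloop (eq.take (i - (find_before_plus (eq.take i)).length) ++
      '(' :: (find_before_plus (eq.take i) ++ '+' ::
        (find_after_plus (eq.drop (i + 1)) ++ ')' ::
          eq.drop (i + (find_after_plus (eq.drop (i + 1))).length + 1)))) (i + 2) := by
  rw [aloop]
  rw [dif_pos h, if_pos hp]

-- ---------- chunk lemmas for the two scans ----------

theorem fbGo_plain : ∀ (u : List Char), plain u → ∀ rest d,
    fbGo (u ++ rest) d = u ++ fbGo rest d := by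
  intro u
  induction u with
  | nil => intro _ rest d; simp
  | cons c u ih =>
    intro hp rest d
    obtain ⟨h1, h2, h3, h4⟩ := hp c (by simp)
    have hu : plain u := fun x hx => hp x (by simp [hx])
    simp only [List.cons_append, fbGo, if_neg h1, if_neg h2]
    rw [if_neg (by simp [h3, h4]), ih hu rest d]

theorem faGo_deep : ∀ (u : List Char) (d : Int),
    (∀ v, v <+: u → (cntC v : Int) + 1 ≤ d + cntO v) → ∀ rest,
    faGo (u ++ rest) d = u ++ faGo rest (d + cntO u - cntC u) := by
  intro u
  induction u with
  | nil => intro d h rest; simp [cntO, cntC]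
  | cons c u ih =>
    intro d h rest
    have hd1 : (1 : Int) ≤ d := by
      have := h [] List.nil_prefix
      simpa [cntO, cntC] using this
    have hsub : ∀ v, v <+: u → (cntC (c :: v) : Int) + 1 ≤ d + cntO (c :: v) :=
      fun v hv => h (c :: v) ((List.cons_prefix_cons).2 ⟨rfl, hv⟩)
    rw [List.cons_append]
    by_cases h1 : c = '('
    · subst h1
      have hih : ∀ v, v <+: u → (cntC v : Int) + 1 ≤ (d + 1) + cntO v := by
        intro v hv
        have := hsub v hv
        rw [cntO_cons, cntC_cons] at this
        simp at this
        push_cast at this ⊢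
        omega
      have hstep : faGo ('(' :: (u ++ rest)) d = '(' :: faGo (u ++ rest) (d + 1) := by
        simp [faGo]
      have harg : d + 1 + (cntO u : Int) - cntC u = d + cntO ('(' :: u) - cntC ('(' :: u) := by
        rw [cntO_cons, cntC_cons]
        simp
        push_cast
        ring
      rw [hstep, ih (d + 1) hih rest, harg]
      simp
    · by_cases h2 : c = ')'
      · subst h2
        have hd2 : (2 : Int) ≤ d := by
          have := hsub [] List.nil_prefix
          rw [cntO_cons, cntC_cons] at this
          simp [cntO, cntC] at this
          omega
        have hih : ∀ v, v <+: u → (cntC v : Int) + 1 ≤ (d - 1) + cntO v := by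
          intro v hv
          have := hsub v hv
          rw [cntO_cons, cntC_cons] at this
          simp at this
          push_cast at this ⊢
          omega
        have hstep : faGo (')' :: (u ++ rest)) d = ')' :: faGo (u ++ rest) (d - 1) := by
          have hne1 : ¬ (d - 1 = 0) := by omega
          have hne2 : ¬ (d - 1 < 0) := by omega
          simp [faGo, hne1, hne2]
        have harg : d - 1 + (cntO u : Int) - cntC u = d + cntO (')' :: u) - cntC (')' :: u) := by
          rw [cntO_cons, cntC_cons]
          simp
          push_cast
          ring
        rw [hstep, ih (d - 1) hih rest, harg]
        simp
      · have hih : ∀ v, v <+: u → (cntC v : Int) + 1 ≤ d + cntO v := by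
          intro v hv
          have := hsub v hv
          rw [cntO_cons, cntC_cons] at this
          simp [h1, h2] at this
          exact_mod_cast this
        have hstep : faGo (c :: (u ++ rest)) d = c :: faGo (u ++ rest) d := by
          have hno : ¬ ((c = '+' ∨ c = '*') ∧ d = 0) := by
            intro hcon
            have := hcon.2
            omega
          simp [faGo, h1, h2, hno]
        have harg : d + (cntO u : Int) - cntC u = d + cntO (c :: u) - cntC (c :: u) := by
          rw [cntO_cons, cntC_cons]
          simp [h1, h2]
        rw [hstep, ih d hih rest, harg]
        simp

theorem fbGo_deep : ∀ (u : List Char) (d : Int),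
    (∀ v, v <+: u → (cntO v : Int) + 1 ≤ d + cntC v) → ∀ rest,
    fbGo (u ++ rest) d = u ++ fbGo rest (d + cntC u - cntO u) := by
  intro u
  induction u with
  | nil => intro d h rest; simp [cntO, cntC]
  | cons c u ih =>
    intro d h rest
    have hd1 : (1 : Int) ≤ d := by
      have := h [] List.nil_prefix
      simpa [cntO, cntC] using this
    have hsub : ∀ v, v <+: u → (cntO (c :: v) : Int) + 1 ≤ d + cntC (c :: v) :=
      fun v hv => h (c :: v) ((List.cons_prefix_cons).2 ⟨rfl, hv⟩)
    rw [List.cons_append]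
    by_cases h1 : c = ')'
    · subst h1
      have hih : ∀ v, v <+: u → (cntO v : Int) + 1 ≤ (d + 1) + cntC v := by
        intro v hv
        have := hsub v hv
        rw [cntO_cons, cntC_cons] at this
        simp at this
        omega
      have hstep : fbGo (')' :: (u ++ rest)) d = ')' :: fbGo (u ++ rest) (d + 1) := by
        simp [fbGo]
      have harg : d + 1 + (cntC u : Int) - cntO u = d + cntC (')' :: u) - cntO (')' :: u) := by
        rw [cntO_cons, cntC_cons]
        simp
        push_cast
        ring
      rw [hstep, ih (d + 1) hih rest, harg]
      simp
    · by_cases h2 : c = '('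
      · subst h2
        have hd2 : (2 : Int) ≤ d := by
          have := hsub [] List.nil_prefix
          rw [cntO_cons, cntC_cons] at this
          simp [cntO, cntC] at this
          omega
        have hih : ∀ v, v <+: u → (cntO v : Int) + 1 ≤ (d - 1) + cntC v := by
          intro v hv
          have := hsub v hv
          rw [cntO_cons, cntC_cons] at this
          simp at this
          omega
        have hstep : fbGo ('(' :: (u ++ rest)) d = '(' :: fbGo (u ++ rest) (d - 1) := by
          have hne1 : ¬ (d - 1 = 0) := by omega
          have hne2 : ¬ (d - 1 < 0) := by omega
          simp [fbGo, hne1, hne2]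
        have harg : d - 1 + (cntC u : Int) - cntO u = d + cntC ('(' :: u) - cntO ('(' :: u) := by
          rw [cntO_cons, cntC_cons]
          simp
          push_cast
          ring
        rw [hstep, ih (d - 1) hih rest, harg]
        simp
      · have hih : ∀ v, v <+: u → (cntO v : Int) + 1 ≤ d + cntC v := by
          intro v hv
          have := hsub v hv
          rw [cntO_cons, cntC_cons] at this
          simp [h1, h2] at this
          exact_mod_cast this
        have hstep : fbGo (c :: (u ++ rest)) d = c :: fbGo (u ++ rest) d := by
          have hno : ¬ ((c = '+' ∨ c = '*') ∧ d = 0) := by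
            intro hcon
            have := hcon.2
            omega
          simp [fbGo, h1, h2, hno]
        have harg : d + (cntC u : Int) - cntO u = d + cntC (c :: u) - cntO (c :: u) := by
          rw [cntO_cons, cntC_cons]
          simp [h1, h2]
        rw [hstep, ih d hih rest, harg]
        simp

-- ---------- KEY-B: A's backward scan recovers exactly B's current operand ----------

theorem keyB (st : List (List Char × List Char × Nat)) (out oper : List Char) (p : Nat)
    (hl : levOK out oper p) :
    find_before_plus (flat st ++ out ++ (oper ++ rep p)) = oper ++ rep p := by
  obtain ⟨hp1, hdo, G, t, hU, hpt, hGT⟩ := hl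
  unfold find_before_plus
  have hrev : (flat st ++ out ++ (oper ++ rep p)).reverse
      = (oper ++ rep p).reverse ++ (out.reverse ++ (flat st).reverse) := by
    simp [List.reverse_append, List.append_assoc]
  rw [hrev]
  suffices hs : fbGo ((oper ++ rep p).reverse ++ (out.reverse ++ (flat st).reverse)) 0
      = (oper ++ rep p).reverse by
    rw [hs, List.reverse_reverse]
  rcases hGT with ⟨rfl, hout⟩ | ⟨hg, hpt1⟩
  · simp only [List.nil_append] at hU
    rw [hU]
    rw [fbGo_plain t.reverse (plain_reverse t hpt) _ 0]
    suffices hz : fbGo (out.reverse ++ (flat st).reverse) 0 = [] by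
      rw [hz, List.append_nil]
    rcases hout with rfl | ⟨o', rfl⟩
    · cases st with
      | nil => simp [flat, fbGo]
      | cons fr st' =>
        obtain ⟨o, c0, q⟩ := fr
        have hfl : (flat ((o, c0, q) :: st')).reverse
            = '(' :: (c0.reverse ++ (o.reverse ++ (flat st').reverse)) := by
          simp [flat, List.reverse_append, List.append_assoc]
        rw [List.reverse_nil, List.nil_append, hfl]
        simp [fbGo]
    · have ho : (o' ++ ['*']).reverse = '*' :: o'.reverse := by simp
      rw [ho]
      simp [fbGo]
  · obtain ⟨M, hM, hGe⟩ := hg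
    rw [hU, hGe]
    have hsh : ((('(' :: M ++ [')']) ++ t).reverse ++ (out.reverse ++ (flat st).reverse))
        = t.reverse ++ (')' :: (M.reverse ++ ('(' :: (out.reverse ++ (flat st).reverse)))) := by
      simp [List.reverse_append, List.append_assoc]
    rw [hsh]
    rw [fbGo_plain t.reverse (plain_reverse t hpt) _ 0]
    have h1 : fbGo (')' :: (M.reverse ++ ('(' :: (out.reverse ++ (flat st).reverse)))) 0
        = ')' :: fbGo (M.reverse ++ ('(' :: (out.reverse ++ (flat st).reverse))) 1 := by
      simp [fbGo]
    rw [h1]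
    have hcond : ∀ v, v <+: M.reverse → (cntO v : Int) + 1 ≤ 1 + cntC v := by
      intro v hv
      have hvs : v.reverse <:+ M := by
        rw [← List.reverse_prefix]
        simpa using hv
      have hcnt := dyck_suffix M hM v.reverse hvs
      rw [cntO_reverse, cntC_reverse] at hcnt
      omega
    rw [fbGo_deep M.reverse 1 hcond _]
    have hMc : (1 : Int) + cntC M.reverse - cntO M.reverse = 1 := by
      rw [cntO_reverse, cntC_reverse]
      have := hM.2
      omega
    rw [hMc]
    have h3 : fbGo ('(' :: (out.reverse ++ (flat st).reverse)) 1 = ['('] := by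
      simp [fbGo]
    rw [h3]
    simp [List.reverse_append, List.append_assoc]

-- ---------- the matching-parenthesis split of a balanced remainder ----------

theorem balSplitAux : ∀ (N : Nat) (w : List Char) (n : Nat), w.length ≤ N →
    balChk w (n + 1) = true →
    ∃ M w', w = M ++ ')' :: w' ∧ pfx M ∧ cntO M = cntC M ∧ balChk w' n = true := by
  intro N
  induction N with
  | zero =>
    intro w n hlen hb
    cases w with
    | nil => simp [balChk] at hb
    | cons c w2 => simp at hlen
  | succ N ih =>
    intro w n hlen hb
    cases w with
    | nil => simp [balChk] at hb
    | cons c w2 =>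
      by_cases h1 : c = '('
      · subst h1
        have hb2 : balChk w2 (n + 2) = true := by simpa [balChk] using hb
        obtain ⟨M1, w1, hw2, hpfx1, hcnt1, hb1⟩ := ih w2 (n + 1) (by simp at hlen; omega) hb2
        have hlen1 : w1.length ≤ N := by
          have := congrArg List.length hw2
          simp at this hlen
          omega
        obtain ⟨M2, w', hw1, hpfx2, hcnt2, hb0⟩ := ih w1 n hlen1 hb1
        refine ⟨'(' :: M1 ++ ')' :: M2, w', ?_, ?_, ?_, hb0⟩
        · rw [hw2, hw1]
          simp
        · intro v hv
          cases v with
          | nil => simp [cntO, cntC]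
          | cons c4 v2 =>
            have hv' : c4 :: v2 <+: '(' :: (M1 ++ ')' :: M2) := by simpa using hv
            obtain ⟨hc4, hv2⟩ := (List.cons_prefix_cons).1 hv'
            subst hc4
            rw [cntO_cons, cntC_cons]
            simp
            rcases prefix_append_cases hv2 with h2 | ⟨v3, rfl, hv3⟩
            · have := hpfx1 v2 h2
              omega
            · cases v3 with
              | nil =>
                have := hpfx1 M1 (List.prefix_refl M1)
                rw [cntO_append, cntC_append, cntO_nil, cntC_nil]
                omega
              | cons c5 v4 =>
                obtain ⟨hc5, hv4⟩ := (List.cons_prefix_cons).1 hv3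
                subst hc5
                have h5 := hpfx2 v4 hv4
                rw [cntO_append, cntC_append, cntO_cons, cntC_cons]
                simp
                omega
        · rw [show ('(' :: M1 ++ ')' :: M2 : List Char) = ('(' :: M1) ++ ')' :: M2 from rfl,
              cntO_append, cntC_append, cntO_cons, cntC_cons, cntO_cons, cntC_cons]
          simp
          omega
      · by_cases h2 : c = ')'
        · subst h2
          have hb2 : balChk w2 n = true := by
            have : balChk (')' :: w2) (n + 1) = (decide (0 < n + 1) && balChk w2 (n + 1 - 1)) := by
              simp [balChk]
            rw [this] at hb
            simpa using hb
          exact ⟨[], w2, by simp, fun v hv => by rw [List.prefix_nil.1 hv]; exact Nat.le_refl _, rfl, hb2⟩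
        · have hb2 : balChk w2 (n + 1) = true := by simpa [balChk, h1, h2] using hb
          obtain ⟨M, w', hw2, hpfx1, hcnt1, hb1⟩ := ih w2 n (by simp at hlen; omega) hb2
          refine ⟨c :: M, w', by rw [hw2]; simp, ?_, ?_, hb1⟩
          · intro v hv
            cases v with
            | nil => simp [cntO, cntC]
            | cons c4 v2 =>
              obtain ⟨hc4, hv2⟩ := (List.cons_prefix_cons).1 hv
              subst hc4
              have := hpfx1 v2 hv2
              rw [cntO_cons, cntC_cons]
              simp [h1, h2]
              omega
          · rw [cntO_cons, cntC_cons]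
            simp [h1, h2]
            omega

theorem balSplit : ∀ (w : List Char) (n : Nat), balChk w (n + 1) = true →
    ∃ M w', w = M ++ ')' :: w' ∧ pfx M ∧ cntO M = cntC M ∧ balChk w' n = true :=
  fun w n hb => balSplitAux w.length w n (Nat.le_refl _) hb

-- dec passes a balanced block through literally (pops inside touch only pushed zeros)
theorem decRun : ∀ (M : List Char) (k : Nat) (L : List Nat) (tail : List Char),
    (∀ v, v <+: M → cntC v ≤ cntO v + k) →
    dec (List.replicate (k + 1) 0 ++ L) (M ++ tail)
      = M ++ dec (List.replicate (k + 1 + cntO M - cntC M) 0 ++ L) tail := by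
  intro M
  induction M with
  | nil => intro k L tail h; simp [cntO, cntC]
  | cons c M ih =>
    intro k L tail h
    have hsub : ∀ v, v <+: M → cntC (c :: v) ≤ cntO (c :: v) + k :=
      fun v hv => h (c :: v) ((List.cons_prefix_cons).2 ⟨rfl, hv⟩)
    have hrepl : (List.replicate (k + 1) 0 ++ L : List Nat)
        = 0 :: (List.replicate k 0 ++ L) := by
      rw [List.replicate_succ]
      simp
    rw [List.cons_append]
    by_cases h1 : c = '('
    · subst h1
      have hih : ∀ v, v <+: M → cntC v ≤ cntO v + (k + 1) := by
        intro v hv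
        have := hsub v hv
        rw [cntO_cons, cntC_cons] at this
        simp at this
        omega
      have hstep : dec (List.replicate (k + 1) 0 ++ L) ('(' :: (M ++ tail))
          = '(' :: dec (List.replicate (k + 2) 0 ++ L) (M ++ tail) := by
        rw [hrepl]
        simp [dec]
        rw [List.replicate_succ, List.replicate_succ]
        simp [List.replicate_succ]
      rw [hstep, ih (k + 1) L tail hih]
      have hc : k + 1 + 1 + cntO M - cntC M = k + 1 + cntO ('(' :: M) - cntC ('(' :: M) := by
        rw [cntO_cons, cntC_cons]
        simp
        omega
      rw [hc]
      simp
    · by_cases h2 : c = ')'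
      · subst h2
        have hk1 : 1 ≤ k := by
          have := h [')'] ⟨M, rfl⟩
          rw [cntO_singleton, cntC_singleton] at this
          simpa using this
        have hih : ∀ v, v <+: M → cntC v ≤ cntO v + (k - 1) := by
          intro v hv
          have := hsub v hv
          rw [cntO_cons, cntC_cons] at this
          simp at this
          omega
        have hrepl2 : (List.replicate (k + 1) 0 ++ L : List Nat)
            = 0 :: 0 :: (List.replicate (k - 1) 0 ++ L) := by
          have hk : k + 1 = (k - 1) + 1 + 1 := by omega
          rw [hk, List.replicate_succ, List.replicate_succ]
          simp
        have hstep : dec (List.replicate (k + 1) 0 ++ L) (')' :: (M ++ tail))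
            = ')' :: dec (List.replicate ((k - 1) + 1) 0 ++ L) (M ++ tail) := by
          rw [hrepl2]
          simp [dec, rep]
          rw [List.replicate_succ]
          simp
        rw [hstep, ih (k - 1) L tail hih]
        have hc : (k - 1) + 1 + cntO M - cntC M = k + 1 + cntO (')' :: M) - cntC (')' :: M) := by
          rw [cntO_cons, cntC_cons]
          simp
          omega
        rw [hc]
        simp
      · have hih : ∀ v, v <+: M → cntC v ≤ cntO v + k := by
          intro v hv
          have := hsub v hv
          rw [cntO_cons, cntC_cons] at this
          simp [h1, h2] at this
          omega
        have hplus : dec (List.replicate (k + 1) 0 ++ L) (c :: (M ++ tail))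
            = c :: dec (List.replicate (k + 1) 0 ++ L) (M ++ tail) := by
          rw [hrepl]
          by_cases h3 : c = '+'
          · simp [dec, h3, rep, hrepl]
          · by_cases h4 : c = '*'
            · simp [dec, h3, h4, rep, hrepl]
            · simp [dec, h1, h2, h3, h4]
        rw [hplus, ih k L tail hih]
        have hc : k + 1 + cntO M - cntC M = k + 1 + cntO (c :: M) - cntC (c :: M) := by
          rw [cntO_cons, cntC_cons]
          simp [h1, h2]
        rw [hc]
        simp

-- ---------- KEY-A: the new pending ')' lands exactly where A's forward scan stops ----------

theorem keyA : ∀ (w : List Char) (ps : List Nat), balChk w ps.length = true →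
    ∃ a r, dec (0 :: ps) w = a ++ r ∧ dec (1 :: ps) w = a ++ ')' :: r ∧
      faGo (a ++ r) 0 = a := by
  intro w
  induction w with
  | nil =>
    intro ps hb
    have hps : ps = [] := by
      cases ps with
      | nil => rfl
      | cons q ps' => simp [balChk] at hb
    subst hps
    exact ⟨[], [], by simp [dec, rep], by simp [dec, rep], by simp [faGo]⟩
  | cons c w ih =>
    intro ps hb
    by_cases h1 : c = '+'
    · subst h1
      have hb2 : balChk w ps.length = true := by simpa [balChk] using hb
      refine ⟨[], '+' :: dec (0 :: ps) w, by simp [dec, rep], by simp [dec, rep], ?_⟩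
      simp [faGo]
    · by_cases h2 : c = '*'
      · subst h2
        refine ⟨[], '*' :: dec (0 :: ps) w, by simp [dec, rep], by simp [dec, rep], ?_⟩
        simp [faGo]
      · by_cases h3 : c = '('
        · subst h3
          have hb2 : balChk w (ps.length + 1) = true := by simpa [balChk] using hb
          obtain ⟨M, w'', hw, hpfx, hcnt, hb3⟩ := balSplit w ps.length hb2
          have hrun : ∀ b : Nat, dec (b :: ps) ('(' :: w)
              = '(' :: M ++ ')' :: (rep b ++ dec (0 :: ps) w'') := by
            intro b
            have hst : dec (b :: ps) ('(' :: w)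
                = '(' :: dec (0 :: b :: ps) (M ++ (')' :: w'')) := by
              rw [hw]
              simp [dec]
            rw [hst]
            have hdr := decRun M 0 (b :: ps) (')' :: w'')
              (by intro v hv; have := hpfx v hv; omega)
            simp at hdr
            rw [show (1 + cntO M - cntC M) = 1 from by omega] at hdr
            rw [hdr]
            have hcl : dec (0 :: b :: ps) (')' :: w'')
                = ')' :: (rep b ++ dec (0 :: ps) w'') := by
              simp [dec, rep]
            rw [show (List.replicate 1 0 ++ b :: ps : List Nat) = 0 :: b :: ps from by simp,
                hcl]
            simp
          refine ⟨'(' :: M ++ [')'], dec (0 :: ps) w'', ?_, ?_, ?_⟩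
          · rw [hrun 0]
            simp [rep]
          · rw [hrun 1]
            simp [rep]
          · have hsh : ('(' :: M ++ [')'] : List Char) ++ dec (0 :: ps) w''
                = '(' :: (M ++ (')' :: dec (0 :: ps) w'')) := by simp
            rw [hsh]
            have hopen : faGo ('(' :: (M ++ (')' :: dec (0 :: ps) w''))) 0
                = '(' :: faGo (M ++ (')' :: dec (0 :: ps) w'')) 1 := by
              simp [faGo]
            rw [hopen]
            have hcond : ∀ v, v <+: M → (cntC v : Int) + 1 ≤ 1 + cntO v := by
              intro v hv
              have := hpfx v hv
              omega
            rw [faGo_deep M 1 hcond _]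
            rw [show ((1 : Int) + cntO M - cntC M) = 1 from by omega]
            have hclose : faGo (')' :: dec (0 :: ps) w'') 1 = [')'] := by
              simp [faGo]
            rw [hclose]
            simp
        · by_cases h4 : c = ')'
          · subst h4
            cases ps with
            | nil => simp [balChk] at hb
            | cons q ps' =>
              refine ⟨[], ')' :: (rep q ++ dec (0 :: ps') w), ?_, ?_, ?_⟩
              · simp [dec, rep]
              · simp [dec, rep]
              · simp [faGo]
          · have hb2 : balChk w ps.length = true := by simpa [balChk, h3, h4] using hb
            obtain ⟨a, r, ha0, ha1, hfa⟩ := ih ps hb2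
            refine ⟨c :: a, r, ?_, ?_, ?_⟩
            · simp [dec, h1, h2, h3, h4, ha0]
            · simp [dec, h1, h2, h3, h4, ha1]
            · rw [List.cons_append]
              simp only [faGo, if_neg h3, if_neg h4]
              rw [if_neg (fun hcon => hcon.1.elim (fun hx => h1 hx) (fun hx => h2 hx)), hfa]

-- ---------- stepping A over one character / a run of ')' ----------

theorem aloop_rep_end : ∀ (m : Nat) (eq : List Char) (i : Nat),
    eq.drop i = rep m → aloop eq i = eq := by
  intro m
  induction m with
  | zero =>
    intro eq i hd
    rw [aloop]
    rw [dif_neg]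
    have hlen := congrArg List.length hd
    simp [rep] at hlen
    omega
  | succ m ih =>
    intro eq i hd
    have hd' : eq.drop i = ')' :: rep m := by
      rw [hd, rep, List.replicate_succ]
      rfl
    rw [aloop_skip eq i ')' (rep m) hd' (by decide)]
    exact ih eq (i + 1) (drop_cons_head eq i ')' (rep m) hd').2

-- ---------- preservation of the invariants ----------

theorem dyck_single (c : Char) (h1 : c ≠ '(') (h2 : c ≠ ')') : dyck [c] := by
  constructor
  · intro v hv
    cases v with
    | nil => exact Nat.le_refl 0
    | cons c4 v4 =>
      obtain ⟨hc4, hv4⟩ := (List.cons_prefix_cons).1 hv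
      subst hc4
      rw [List.prefix_nil.1 hv4]
      rw [cntO_singleton, cntC_singleton]
      simp [h1, h2]
  · rw [cntO_singleton, cntC_singleton]
    simp [h1, h2]


theorem wf_step (s : BSt) (c : Char) (h : WF s) : WF (bstep s c) := by
  obtain ⟨⟨hp1, hdo, G, t, hU, hpt, hGT⟩, hst⟩ := h
  have hdU : dyck (s.oper ++ rep s.p) := by
    rw [hU]
    rcases hGT with ⟨rfl, _⟩ | ⟨hg, _⟩
    · simpa using plain_dyck t hpt
    · exact dyck_append G t (grp_dyck G hg) (plain_dyck t hpt)
  by_cases h1 : c = '+'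
  · subst h1
    have hbs : bstep s '+' = ⟨s.stack, s.out, '(' :: s.oper ++ rep s.p ++ ['+'], 1⟩ := by
      simp [bstep]
    rw [hbs]
    refine ⟨⟨Nat.le_refl 1, hdo, '(' :: (s.oper ++ rep s.p ++ ['+']) ++ [')'], [], ?_, ?_,
      Or.inr ⟨⟨s.oper ++ rep s.p ++ ['+'], ?_, rfl⟩, fun _ => rfl⟩⟩, hst⟩
    · simp [rep]
    · intro x hx; simp at hx
    · exact dyck_append _ _ hdU (dyck_single '+' (by decide) (by decide))
  · by_cases h2 : c = '*'
    · subst h2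
      have hbs : bstep s '*' = ⟨s.stack, s.out ++ s.oper ++ rep s.p ++ ['*'], [], 0⟩ := by
        simp [bstep]
      rw [hbs]
      have hdo2 : dyck (s.out ++ s.oper ++ rep s.p) := by
        have h5 := dyck_append _ _ hdo hdU
        rw [← List.append_assoc] at h5
        exact h5
      refine ⟨⟨Nat.zero_le 1, ?_, [], [], by simp [rep], ?_,
        Or.inl ⟨rfl, Or.inr ⟨s.out ++ s.oper ++ rep s.p, rfl⟩⟩⟩, hst⟩
      · exact dyck_append _ _ hdo2 (dyck_single '*' (by decide) (by decide))
      · intro x hx; simp at hx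
    · by_cases h3 : c = '('
      · subst h3
        have hbs : bstep s '(' = ⟨(s.out, s.oper, s.p) :: s.stack, [], [], 0⟩ := by
          simp [bstep]
        rw [hbs]
        exact ⟨⟨Nat.zero_le 1, dyck_nil, [], [], by simp [rep], fun x hx => by simp at hx,
          Or.inl ⟨rfl, Or.inl rfl⟩⟩, ⟨hp1, hdo, G, t, hU, hpt, hGT⟩, hst⟩
      · by_cases h4 : c = ')'
        · subst h4
          cases hstk : s.stack with
          | nil =>
            have hbs : bstep s ')' = s := by
              simp [bstep, hstk]
            rw [hbs]
            exact ⟨⟨hp1, hdo, G, t, hU, hpt, hGT⟩, hst⟩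
          | cons fr st =>
            obtain ⟨o, c0, q⟩ := fr
            rw [hstk] at hst
            obtain ⟨⟨hq1, hdo2, G2, t2, hU2, hpt2, hGT2⟩, hst'⟩ := hst
            have hgg : grp ('(' :: (s.out ++ s.oper ++ rep s.p) ++ [')']) := by
              refine ⟨s.out ++ s.oper ++ rep s.p, ?_, rfl⟩
              have h5 := dyck_append _ _ hdo hdU
              rw [← List.append_assoc] at h5
              exact h5
            by_cases hq : q = 0
            · subst hq
              have hbs : bstep s ')' = ⟨st, o ++ c0, '(' :: (s.out ++ s.oper ++ rep s.p) ++ [')'], 0⟩ := by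
                simp [bstep, hstk]
              rw [hbs]
              have hdc0 : dyck c0 := by
                have h7 : c0 = G2 ++ t2 := by simpa [rep] using hU2
                rw [h7]
                rcases hGT2 with ⟨rfl, _⟩ | ⟨hg2, _⟩
                · simpa using plain_dyck t2 hpt2
                · exact dyck_append _ _ (grp_dyck G2 hg2) (plain_dyck t2 hpt2)
              exact ⟨⟨Nat.zero_le 1, dyck_append _ _ hdo2 hdc0,
                '(' :: (s.out ++ s.oper ++ rep s.p) ++ [')'], [], by simp [rep],
                fun x hx => by simp at hx, Or.inr ⟨hgg, fun _ => rfl⟩⟩, hst'⟩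
            · have hq1' : q = 1 := by omega
              subst hq1'
              have hbs : bstep s ')' = ⟨st, o,
                  c0 ++ ('(' :: (s.out ++ s.oper ++ rep s.p) ++ [')']) ++ [')'], 0⟩ := by
                simp [bstep, hstk]
              rw [hbs]
              rcases hGT2 with ⟨rfl, hout2⟩ | ⟨hg2, hpt12⟩
              · exfalso
                have hmem : (')' : Char) ∈ ([] : List Char) ++ t2 := by
                  rw [← hU2]
                  simp [rep]
                simp at hmem
                exact (hpt2 ')' hmem).2.1 rfl
              · have ht2 : t2 = [] := hpt12 rfl
                subst ht2
                obtain ⟨M2, hM2, hge2⟩ := hg2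
                have hc0 : c0 = '(' :: M2 := by
                  have h6 : c0 ++ [')'] = ('(' :: M2) ++ [')'] := by
                    have h8 := hU2
                    rw [hge2] at h8
                    simpa [rep] using h8
                  have h9 := congrArg List.dropLast h6
                  rw [List.dropLast_concat, List.dropLast_concat] at h9
                  exact h9
                refine ⟨⟨Nat.zero_le 1, hdo2,
                  c0 ++ ('(' :: (s.out ++ s.oper ++ rep s.p) ++ [')']) ++ [')'], [], by simp [rep],
                  fun x hx => by simp at hx,
                  Or.inr ⟨⟨M2 ++ ('(' :: (s.out ++ s.oper ++ rep s.p) ++ [')']), ?_, ?_⟩,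
                    fun _ => rfl⟩⟩, hst'⟩
                · exact dyck_append _ _ hM2 (grp_dyck _ hgg)
                · rw [hc0]
                  simp
        · have hbs : bstep s c = ⟨s.stack, s.out, s.oper ++ [c], s.p⟩ := by
            simp [bstep, h1, h2, h3, h4]
          rw [hbs]
          have hplc : plain [c] := by
            intro x hx
            simp at hx
            subst hx
            exact ⟨h3, h4, h1, h2⟩
          by_cases hp0 : s.p = 0
          · rw [hp0]
            have hU0 : s.oper = G ++ t := by
              have h8 := hU
              rw [hp0] at h8
              simpa [rep] using h8
            refine ⟨⟨Nat.zero_le 1, hdo, G, t ++ [c], ?_, ?_, ?_⟩, hst⟩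
            · rw [hU0]
              simp [rep]
            · intro x hx
              rcases List.mem_append.1 hx with hx | hx
              · exact hpt x hx
              · exact hplc x hx
            · rcases hGT with ⟨rfl, hout⟩ | ⟨hg, _⟩
              · exact Or.inl ⟨rfl, hout⟩
              · exact Or.inr ⟨hg, fun hh => absurd hh (by simp)⟩
          · have hp1' : s.p = 1 := by omega
            rw [hp1']
            rcases hGT with ⟨rfl, hout⟩ | ⟨hg, hpt1⟩
            · exfalso
              have hmem : (')' : Char) ∈ ([] : List Char) ++ t := by
                rw [← hU]
                simp [rep, hp1']
              simp at hmem
              exact (hpt ')' hmem).2.1 rfl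
            · have ht : t = [] := hpt1 hp1'
              subst ht
              obtain ⟨M, hM, hGe⟩ := hg
              have hoper : s.oper = '(' :: M := by
                have h6 : s.oper ++ [')'] = ('(' :: M) ++ [')'] := by
                  have h8 := hU
                  rw [hGe] at h8
                  simpa [rep, hp1'] using h8
                have h9 := congrArg List.dropLast h6
                rw [List.dropLast_concat, List.dropLast_concat] at h9
                exact h9
              refine ⟨⟨Nat.le_refl 1, hdo, '(' :: (M ++ [c]) ++ [')'], [], ?_,
                fun x hx => by simp at hx,
                Or.inr ⟨⟨M ++ [c], dyck_append _ _ hM (plain_dyck [c] hplc), rfl⟩,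
                  fun _ => rfl⟩⟩, hst⟩
              rw [hoper]
              simp [rep]

-- ---------- the main simulation ----------

theorem sim : ∀ (w : List Char) (s : BSt), WF s → balChk w s.stack.length = true →
    aloop (flat s.stack ++ s.out ++ s.oper ++ dec (pend s) w)
        (flat s.stack ++ s.out ++ s.oper).length
      = (w.foldl bstep s).out ++ (w.foldl bstep s).oper ++ rep (w.foldl bstep s).p := by
  intro w
  induction w with
  | nil =>
    intro s hWF hb
    have hn : s.stack.length = 0 := by simpa [balChk] using hb
    have hstk : s.stack = [] := List.eq_nil_of_length_eq_zero hn
    have hdec : dec (pend s) [] = rep s.p := by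
      simp [pend, hstk, dec, rep]
    rw [List.foldl_nil, hdec]
    have hend := aloop_rep_end s.p (flat s.stack ++ s.out ++ s.oper ++ rep s.p)
        (flat s.stack ++ s.out ++ s.oper).length (by rw [List.drop_left])
    rw [hend, hstk]
    simp [flat]
  | cons c w ih =>
    intro s hWF hb
    by_cases h1 : c = '+'
    · subst h1
      have hdec : dec (pend s) ('+' :: w)
          = rep s.p ++ '+' :: dec (0 :: s.stack.map (fun f => f.2.2)) w := by
        simp [pend, dec]
      set F := flat s.stack ++ s.out ++ s.oper with hF
      have hskip := aloop_skip_many (rep s.p) (F ++ dec (pend s) ('+' :: w)) F.length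
          ('+' :: dec (0 :: s.stack.map (fun f => f.2.2)) w)
          (by rw [List.drop_left, hdec])
          (fun x hx => by rw [rep] at hx; rw [List.eq_of_mem_replicate hx]; decide)
      rw [hskip]
      have hrl : (rep s.p).length = s.p := by simp [rep]
      rw [hrl]
      have hEeq : F ++ dec (pend s) ('+' :: w)
          = (F ++ rep s.p) ++ '+' :: dec (0 :: s.stack.map (fun f => f.2.2)) w := by
        rw [hdec]
        simp
      have hi' : F.length + s.p = (F ++ rep s.p).length := by simp [rep]
      have hdrop1 : (F ++ dec (pend s) ('+' :: w)).drop (F.length + s.p)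
          = '+' :: dec (0 :: s.stack.map (fun f => f.2.2)) w := by
        rw [hEeq, hi', List.drop_left]
      obtain ⟨hilt, hdropP1⟩ := drop_cons_head _ _ _ _ hdrop1
      have hgel := drop_cons_getElem _ _ _ _ hdrop1 hilt
      rw [aloop_plus _ _ hilt hgel]
      have htakei : (F ++ dec (pend s) ('+' :: w)).take (F.length + s.p) = F ++ rep s.p := by
        rw [hEeq, hi', List.take_left]
      have hbefore : find_before_plus ((F ++ dec (pend s) ('+' :: w)).take (F.length + s.p))
          = s.oper ++ rep s.p := by
        rw [htakei]
        have hsh : F ++ rep s.p = flat s.stack ++ s.out ++ (s.oper ++ rep s.p) := by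
          rw [hF]
          simp [List.append_assoc]
        rw [hsh]
        exact keyB s.stack s.out s.oper s.p hWF.1
      have hbal : balChk w (s.stack.map (fun f => f.2.2)).length = true := by
        simp only [List.length_map]
        simpa [balChk] using hb
      obtain ⟨a, r, ha0, ha1, hfa⟩ := keyA w _ hbal
      have hafter : find_after_plus
          ((F ++ dec (pend s) ('+' :: w)).drop (F.length + s.p + 1)) = a := by
        rw [hdropP1, ha0]
        exact hfa
      rw [hbefore, hafter]
      have hlb2 : F.length + s.p - (s.oper ++ rep s.p).length
          = (flat s.stack ++ s.out).length := by
        rw [hF]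
        simp [rep]
        omega
      rw [hlb2]
      have htake2 : (F ++ dec (pend s) ('+' :: w)).take ((flat s.stack ++ s.out).length)
          = flat s.stack ++ s.out := by
        have hsh2 : F ++ dec (pend s) ('+' :: w)
            = (flat s.stack ++ s.out) ++ (s.oper ++ dec (pend s) ('+' :: w)) := by
          rw [hF]
          simp [List.append_assoc]
        rw [hsh2, List.take_left]
      rw [htake2]
      have hdropR : (F ++ dec (pend s) ('+' :: w)).drop (F.length + s.p + a.length + 1) = r := by
        have hsh3 : F ++ dec (pend s) ('+' :: w) = ((F ++ rep s.p) ++ ('+' :: a)) ++ r := by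
          rw [hEeq, ha0]
          simp
        rw [hsh3]
        have hlen3 : F.length + s.p + a.length + 1 = ((F ++ rep s.p) ++ ('+' :: a)).length := by
          simp [rep]
          omega
        rw [hlen3, List.drop_left]
      rw [hdropR]
      rw [List.foldl_cons]
      have hbs : bstep s '+' = ⟨s.stack, s.out, '(' :: s.oper ++ rep s.p ++ ['+'], 1⟩ := by
        simp [bstep]
      rw [hbs]
      have hIH := ih ⟨s.stack, s.out, '(' :: s.oper ++ rep s.p ++ ['+'], 1⟩
          (hbs ▸ wf_step s '+' hWF)
          (by simpa [balChk] using hb)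
      have hps : pend (⟨s.stack, s.out, '(' :: s.oper ++ rep s.p ++ ['+'], 1⟩ : BSt)
          = 1 :: s.stack.map (fun f => f.2.2) := by simp [pend]
      have e1 : flat s.stack ++ s.out ++ '(' :: (s.oper ++ rep s.p ++ '+' :: (a ++ ')' :: r))
          = flat s.stack ++ s.out ++ ('(' :: s.oper ++ rep s.p ++ ['+'])
            ++ dec (pend ⟨s.stack, s.out, '(' :: s.oper ++ rep s.p ++ ['+'], 1⟩) w := by
        rw [hps, ha1]
        simp [List.append_assoc]
      have e2 : F.length + s.p + 2
          = (flat s.stack ++ s.out ++ ('(' :: s.oper ++ rep s.p ++ ['+'])).length := by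
        rw [hF]
        simp [rep]
        omega
      rw [e1, e2]
      exact hIH
    · by_cases h2 : c = '*'
      · subst h2
        have hdec : dec (pend s) ('*' :: w)
            = rep s.p ++ '*' :: dec (0 :: s.stack.map (fun f => f.2.2)) w := by
          simp [pend, dec]
        set F := flat s.stack ++ s.out ++ s.oper with hF
        have hskip := aloop_skip_many (rep s.p ++ ['*']) (F ++ dec (pend s) ('*' :: w)) F.length
            (dec (0 :: s.stack.map (fun f => f.2.2)) w)
            (by rw [List.drop_left, hdec]; simp)
            (fun x hx => by
              rcases List.mem_append.1 hx with hx | hx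
              · rw [rep] at hx; rw [List.eq_of_mem_replicate hx]; decide
              · simp at hx; rw [hx]; decide)
        rw [hskip, List.foldl_cons]
        have hbs : bstep s '*' = ⟨s.stack, s.out ++ s.oper ++ rep s.p ++ ['*'], [], 0⟩ := by
          simp [bstep]
        rw [hbs]
        have hIH := ih ⟨s.stack, s.out ++ s.oper ++ rep s.p ++ ['*'], [], 0⟩
            (hbs ▸ wf_step s '*' hWF) (by simpa [balChk] using hb)
        have hps : pend (⟨s.stack, s.out ++ s.oper ++ rep s.p ++ ['*'], [], 0⟩ : BSt)
            = 0 :: s.stack.map (fun f => f.2.2) := by simp [pend]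
        have e1 : F ++ dec (pend s) ('*' :: w)
            = flat s.stack ++ (s.out ++ s.oper ++ rep s.p ++ ['*']) ++ []
              ++ dec (pend ⟨s.stack, s.out ++ s.oper ++ rep s.p ++ ['*'], [], 0⟩) w := by
          rw [hdec, hF, hps]
          simp [List.append_assoc]
        have e2 : F.length + (rep s.p ++ ['*']).length
            = (flat s.stack ++ (s.out ++ s.oper ++ rep s.p ++ ['*']) ++ []).length := by
          rw [hF]
          simp [rep]
          omega
        rw [e1, e2]
        exact hIH
      · by_cases h3 : c = '('
        · subst h3
          have hdec : dec (pend s) ('(' :: w)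
              = '(' :: dec (0 :: s.p :: s.stack.map (fun f => f.2.2)) w := by
            simp [pend, dec]
          set F := flat s.stack ++ s.out ++ s.oper with hF
          have hskip := aloop_skip (F ++ dec (pend s) ('(' :: w)) F.length '('
              (dec (0 :: s.p :: s.stack.map (fun f => f.2.2)) w)
              (by rw [List.drop_left, hdec]) (by decide)
          rw [hskip, List.foldl_cons]
          have hbs : bstep s '(' = ⟨(s.out, s.oper, s.p) :: s.stack, [], [], 0⟩ := by
            simp [bstep]
          rw [hbs]
          have hIH := ih ⟨(s.out, s.oper, s.p) :: s.stack, [], [], 0⟩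
              (hbs ▸ wf_step s '(' hWF) (by simpa [balChk] using hb)
          have hps : pend (⟨(s.out, s.oper, s.p) :: s.stack, [], [], 0⟩ : BSt)
              = 0 :: s.p :: s.stack.map (fun f => f.2.2) := by simp [pend]
          have e1 : F ++ dec (pend s) ('(' :: w)
              = flat ((s.out, s.oper, s.p) :: s.stack) ++ [] ++ []
                ++ dec (pend ⟨(s.out, s.oper, s.p) :: s.stack, [], [], 0⟩) w := by
            rw [hdec, hF, hps]
            simp [flat, List.append_assoc]
          have e2 : F.length + 1 = (flat ((s.out, s.oper, s.p) :: s.stack) ++ [] ++ []).length := by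
            rw [hF]
            simp [flat]
            omega
          rw [e1, e2]
          exact hIH
        · by_cases h4 : c = ')'
          · subst h4
            cases hstk : s.stack with
            | nil =>
              exfalso
              rw [hstk] at hb
              simp [balChk] at hb
            | cons fr st =>
              obtain ⟨o, c0, q⟩ := fr
              rw [← hstk]
              have hq1 : q ≤ 1 := by
                have h9 := hWF.2
                rw [hstk] at h9
                exact h9.1.1
              have hdec : dec (pend s) (')' :: w)
                  = rep s.p ++ ')' :: (rep q ++ dec (0 :: st.map (fun f => f.2.2)) w) := by
                simp [pend, hstk, dec]
              set F := flat s.stack ++ s.out ++ s.oper with hF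
              have hskip := aloop_skip_many (rep s.p ++ ')' :: rep q)
                  (F ++ dec (pend s) (')' :: w)) F.length
                  (dec (0 :: st.map (fun f => f.2.2)) w)
                  (by rw [List.drop_left, hdec]; simp)
                  (fun x hx => by
                    rcases List.mem_append.1 hx with hx | hx
                    · rw [rep] at hx; rw [List.eq_of_mem_replicate hx]; decide
                    · rcases List.mem_cons.1 hx with hx | hx
                      · rw [hx]; decide
                      · rw [rep] at hx; rw [List.eq_of_mem_replicate hx]; decide)
              rw [hskip, List.foldl_cons]
              have hbal2 : balChk w ((⟨st, [], [], 0⟩ : BSt).stack.length) = true := by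
                rw [hstk] at hb
                simpa [balChk] using hb
              by_cases hq : q = 0
              · subst hq
                have hbs : bstep s ')'
                    = ⟨st, o ++ c0, '(' :: (s.out ++ s.oper ++ rep s.p) ++ [')'], 0⟩ := by
                  simp [bstep, hstk]
                rw [hbs]
                have hIH := ih ⟨st, o ++ c0, '(' :: (s.out ++ s.oper ++ rep s.p) ++ [')'], 0⟩
                    (hbs ▸ wf_step s ')' hWF) (by simpa using hbal2)
                have hps : pend (⟨st, o ++ c0, '(' :: (s.out ++ s.oper ++ rep s.p) ++ [')'], 0⟩ : BSt)
                    = 0 :: st.map (fun f => f.2.2) := by simp [pend]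
                have e1 : F ++ dec (pend s) (')' :: w)
                    = flat st ++ (o ++ c0) ++ ('(' :: (s.out ++ s.oper ++ rep s.p) ++ [')'])
                      ++ dec (pend ⟨st, o ++ c0, '(' :: (s.out ++ s.oper ++ rep s.p) ++ [')'], 0⟩) w := by
                  rw [hdec, hF, hps, hstk]
                  simp [flat, rep, List.append_assoc]
                have e2 : F.length + (rep s.p ++ ')' :: rep 0).length
                    = (flat st ++ (o ++ c0)
                        ++ ('(' :: (s.out ++ s.oper ++ rep s.p) ++ [')'])).length := by
                  rw [hF, hstk]
                  simp [flat, rep]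
                  omega
                rw [e1, e2]
                exact hIH
              · have hq1' : q = 1 := by omega
                subst hq1'
                have hbs : bstep s ')' = ⟨st, o,
                    c0 ++ ('(' :: (s.out ++ s.oper ++ rep s.p) ++ [')']) ++ [')'], 0⟩ := by
                  simp [bstep, hstk]
                rw [hbs]
                have hIH := ih ⟨st, o, c0 ++ ('(' :: (s.out ++ s.oper ++ rep s.p) ++ [')']) ++ [')'], 0⟩
                    (hbs ▸ wf_step s ')' hWF) (by simpa using hbal2)
                have hps : pend (⟨st, o,
                    c0 ++ ('(' :: (s.out ++ s.oper ++ rep s.p) ++ [')']) ++ [')'], 0⟩ : BSt)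
                    = 0 :: st.map (fun f => f.2.2) := by simp [pend]
                have e1 : F ++ dec (pend s) (')' :: w)
                    = flat st ++ o ++ (c0 ++ ('(' :: (s.out ++ s.oper ++ rep s.p) ++ [')']) ++ [')'])
                      ++ dec (pend ⟨st, o,
                          c0 ++ ('(' :: (s.out ++ s.oper ++ rep s.p) ++ [')']) ++ [')'], 0⟩) w := by
                  rw [hdec, hF, hps, hstk]
                  simp [flat, rep, List.append_assoc]
                have e2 : F.length + (rep s.p ++ ')' :: rep 1).length
                    = (flat st ++ o
                        ++ (c0 ++ ('(' :: (s.out ++ s.oper ++ rep s.p) ++ [')']) ++ [')'])).length := by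
                  rw [hF, hstk]
                  simp [flat, rep]
                  omega
                rw [e1, e2]
                exact hIH
          · have hdec : dec (pend s) (c :: w) = c :: dec (pend s) w := by
              simp [pend, dec, h1, h2, h3, h4]
            set F := flat s.stack ++ s.out ++ s.oper with hF
            have hskip := aloop_skip (F ++ dec (pend s) (c :: w)) F.length c (dec (pend s) w)
                (by rw [List.drop_left, hdec]) h1
            rw [hskip, List.foldl_cons]
            have hbs : bstep s c = ⟨s.stack, s.out, s.oper ++ [c], s.p⟩ := by
              simp [bstep, h1, h2, h3, h4]
            rw [hbs]
            have hIH := ih ⟨s.stack, s.out, s.oper ++ [c], s.p⟩ (hbs ▸ wf_step s c hWF)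
                (by simpa [balChk, h3, h4] using hb)
            have hps : pend (⟨s.stack, s.out, s.oper ++ [c], s.p⟩ : BSt) = pend s := by
              simp [pend]
            have e1 : F ++ dec (pend s) (c :: w)
                = flat s.stack ++ s.out ++ (s.oper ++ [c])
                  ++ dec (pend ⟨s.stack, s.out, s.oper ++ [c], s.p⟩) w := by
              rw [hdec, hF, hps]
              simp [List.append_assoc]
            have e2 : F.length + 1 = (flat s.stack ++ s.out ++ (s.oper ++ [c])).length := by
              rw [hF]
              simp
              omega
            rw [e1, e2]
            exact hIH

-- ===== VERDICT (by name: the statement is the Claim_ definition above) =====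
theorem plus_add_parenthesis_spec : Claim_equal_plus_add_parenthesis := by
  intro eq hdom hpre
  unfold Spec_plus_add_parenthesis
  unfold plus_add_parenthesis plus_add_parenthesis_alt
  have hWF0 : WF ⟨[], [], [], 0⟩ := by
    refine ⟨⟨Nat.zero_le 1, dyck_nil, [], [], by simp [rep], ?_, Or.inl ⟨rfl, Or.inl rfl⟩⟩, trivial⟩
    intro x hx
    simp at hx
  have hsim := sim eq.toList ⟨[], [], [], 0⟩ hWF0 (by simpa using hpre)
  have hdec0 : dec (pend ⟨[], [], [], 0⟩) eq.toList = eq.toList := by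
    have h0 := dec_zeros eq.toList [] (by intro q hq; simp at hq)
    simpa [pend] using h0
  rw [hdec0] at hsim
  simp only [flat, List.nil_append, List.append_nil, List.length_nil] at hsim
  rw [hsim]
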